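-- pv_equiv track=rewrite | github.com/Rampagy/CrossCribbage | ComputeScore.py | HistogramRow
-- ===== SOURCE A (Python) =====
-- def HistogramRow(row):
--     histogram = {}
--     row = sorted(row)
--
--     for i in range(0, len(row)):
--         if not row[i] in histogram:
--             histogram[row[i]] = 1
--         else:
--             histogram[row[i]] += 1
--
--     return histogram
-- ===== SOURCE B (Python) =====
-- def HistogramRow(row):
--     return {v: row.count(v) for v in sorted(set(row))}
-- ===== Notes on version B (the rewrite author's own statement) =====
-- stated objective: idiomatic
-- what changed: A sorts the whole list and runs a single accumulating pass that branches on dict membership; B maintains no accumulator at all: it computes the sorted distinct values once via sorted(set(row)) and builds the result by rescanning the list with row.count(v) for each distinct value.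
import Mathlib
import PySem

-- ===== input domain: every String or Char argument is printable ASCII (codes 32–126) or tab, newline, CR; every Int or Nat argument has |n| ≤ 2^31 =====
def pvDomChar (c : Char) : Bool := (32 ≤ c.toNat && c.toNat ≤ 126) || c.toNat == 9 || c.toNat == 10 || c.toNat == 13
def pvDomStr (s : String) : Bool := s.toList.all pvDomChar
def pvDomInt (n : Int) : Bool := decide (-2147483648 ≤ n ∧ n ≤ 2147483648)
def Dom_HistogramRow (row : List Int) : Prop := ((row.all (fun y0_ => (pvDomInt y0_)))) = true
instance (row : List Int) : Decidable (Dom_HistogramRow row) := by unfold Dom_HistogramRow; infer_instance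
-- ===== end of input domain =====

-- B keeps no accumulator: it takes the sorted distinct values once and rescans the list
-- with row.count(v) for each of them (objective: idiomatic; not claimed faster).

-- ===== PORT A =====
-- A: histogram = {}; row = sorted(row); for i in range(0, len(row)): branch on membership; return histogram.
-- pyGetD with default 0 is exact here because every i in range(0, len(row)) is in range.
def HistogramRow (row : List Int) : List (Int × Int) :=
  let srow := PySem.List.sorted row (fun x => x)
  ((PySem.List.pyRange 0 (PySem.List.len srow)).foldl
    (fun (h : PySem.Dict Int Int) i =>
      if ¬ h.contains (PySem.List.pyGetD srow i 0) then
        h.insert (PySem.List.pyGetD srow i 0) 1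
      else
        h.insert (PySem.List.pyGetD srow i 0) (h.getD (PySem.List.pyGetD srow i 0) 0 + 1))
    PySem.Dict.empty).items

-- ===== PORT B =====
-- B: {v: row.count(v) for v in sorted(set(row))}
def HistogramRow_alt (row : List Int) : List (Int × Int) :=
  (PySem.List.sorted (PySem.Set.ofList row) (fun v => v)).map
    (fun v => (v, (PySem.List.count row v : Int)))

-- ===== PRECONDITION & SPEC =====
def Spec_HistogramRow (row : List Int) (out : List (Int × Int)) : Prop := out = HistogramRow_alt row
instance (row : List Int) (out : List (Int × Int)) : Decidable (Spec_HistogramRow row out) := by unfold Spec_HistogramRow; infer_instance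

-- ===== CLAIM =====
def Claim_equal_HistogramRow : Prop := ∀ (row : List Int), Dom_HistogramRow row → Spec_HistogramRow row (HistogramRow row)

-- ===== LEMMAS AND PROOFS =====

-- A's loop body is the counter step: when the key is absent, getD gives 0, so both branches insert getD+1.
theorem histA_foldl_eq_counter (xs : List Int) :
    xs.foldl
      (fun (h : PySem.Dict Int Int) v =>
        if ¬ h.contains v then h.insert v 1 else h.insert v (h.getD v 0 + 1))
      PySem.Dict.empty = PySem.Dict.counter xs := by
  rw [← PySem.Dict.foldl_insert_getD_add_one_eq_counter]
  apply PySem.List.foldl_congr_mem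
  intro h v _
  by_cases hc : h.contains v
  · simp [hc]
  · simp only [Bool.not_eq_true] at hc
    simp [hc, PySem.Dict.getD_of_not_contains _ _ hc]

-- first-occurrence dedup of a ≤-sorted list is strictly increasing (loop invariant on Set.add)
theorem pairwise_lt_foldl_add (xs : List Int) :
    ∀ (acc : List Int), acc.Pairwise (· < ·) → (∀ a ∈ acc, ∀ x ∈ xs, a ≤ x) →
      xs.Pairwise (· ≤ ·) → (xs.foldl PySem.Set.add acc).Pairwise (· < ·) := by
  induction xs with
  | nil => intro acc h _ _; simpa using h
  | cons x rest ih =>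
    intro acc hacc hle hsorted
    rw [List.pairwise_cons] at hsorted
    simp only [List.foldl_cons]
    by_cases hc : PySem.Set.contains acc x
    · rw [show PySem.Set.add acc x = acc by
        simp only [PySem.Set.add, hc]; simp]
      exact ih acc hacc (fun a ha y hy => hle a ha y (List.mem_cons_of_mem _ hy)) hsorted.2
    · rw [show PySem.Set.add acc x = acc ++ [x] by
        simp only [PySem.Set.add, hc]; simp]
      have hxnot : x ∉ acc := by
        intro hmem; exact hc (by simpa [PySem.Set.contains] using hmem)
      apply ih
      · rw [List.pairwise_append]
        refine ⟨hacc, List.pairwise_singleton _ _, ?_⟩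
        intro a ha y hy
        rw [List.mem_singleton.mp hy]
        exact lt_of_le_of_ne (hle a ha x (by simp)) (fun h => hxnot (h ▸ ha))
      · intro a ha y hy
        rcases List.mem_append.mp ha with h1 | h1
        · exact hle a h1 y (List.mem_cons_of_mem _ hy)
        · rw [List.mem_singleton] at h1; subst h1; exact hsorted.1 y hy
      · exact hsorted.2

theorem pairwise_lt_ofList_sorted (row : List Int) :
    (PySem.Set.ofList (PySem.List.sorted row (fun x => x))).Pairwise (· < ·) := by
  rw [PySem.Set.ofList_eq_foldl]
  exact pairwise_lt_foldl_add _ [] (List.Pairwise.nil) (by simp)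
    (PySem.List.sorted_pairwise row (fun x => x))

-- sorted distinct values of row = distinct values of sorted row (perm + both strictly increasing)
theorem sorted_ofList_eq_ofList_sorted (row : List Int) :
    PySem.List.sorted (PySem.Set.ofList row) (fun v => v) =
      PySem.Set.ofList (PySem.List.sorted row (fun x => x)) := by
  apply PySem.List.sorted_eq_of_perm_of_pairwise_lt
  · rw [List.perm_ext_iff_of_nodup (PySem.Set.nodup_ofList _) (PySem.Set.nodup_ofList _)]
    intro a
    rw [PySem.Set.mem_ofList, PySem.Set.mem_ofList, PySem.List.mem_sorted]
  · exact pairwise_lt_ofList_sorted row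

theorem HistogramRow_eq (row : List Int) : HistogramRow row = HistogramRow_alt row := by
  simp only [HistogramRow, HistogramRow_alt]
  rw [PySem.List.foldl_pyRange_pyGetD (PySem.List.sorted row (fun x => x)) 0
    (fun (h : PySem.Dict Int Int) v =>
      if ¬ h.contains v then h.insert v 1 else h.insert v (h.getD v 0 + 1))
    PySem.Dict.empty (le_refl 0)]
  simp only [Int.toNat_zero, List.drop_zero]
  rw [histA_foldl_eq_counter, PySem.Dict.items_counter, ← sorted_ofList_eq_ofList_sorted]
  apply List.map_congr_left
  intro v hv
  have h := (PySem.List.sorted_perm row (fun x => x) false).count_eq v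
  simp [PySem.List.count, h]

-- ===== VERDICT =====
theorem HistogramRow_spec : Claim_equal_HistogramRow := by
  intro row _
  exact HistogramRow_eq row
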